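-- pv_equiv track=rewrite | github.com/QGAN2019/Long_Jump_Feature_Estimation | utils.py | contact2phase
-- ===== SOURCE A (Python) =====
-- def contact2phase(contacts):
--   stepPhase = []
--   phaseON = []
--   phaseOFF = []
--   l = 0 # left
--   for i in range(1,len(contacts)):
--     if contacts[i] == 0 and contacts[i-1] == 1:
--       phaseON = [l,i]
--       l = i
--     elif contacts[i] > 0 and contacts[i-1] == 0:
--       phaseOFF = [l,i]
--       l = i
--       stepPhase.append([phaseON, phaseOFF])
--   return stepPhase
-- ===== SOURCE B (Python) =====
-- def contact2phase(contacts):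
--     # Pass 1: collect transition events; kind True = foot-fall (1 -> 0), False = rise (0 -> >0).
--     events = [(contacts[i] == 0, i)
--               for i in range(1, len(contacts))
--               if (contacts[i] == 0 and contacts[i - 1] == 1)
--               or (contacts[i] > 0 and contacts[i - 1] == 0)]
--     # Pass 2: replay the events, maintaining the left boundary and the current ON phase.
--     stepPhase = []
--     phaseON = []
--     l = 0
--     for fall, i in events:
--         if fall:
--             phaseON = [l, i]
--         else:
--             stepPhase.append([phaseON, [l, i]])
--         l = i
--     return stepPhase
-- ===== Notes on version B (the rewrite author's own statement) =====
-- stated objective: alternative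
-- what changed: Single fused conditional loop replaced by a two-pass decomposition: a comprehension first extracts the transition events (fall 1->0, rise 0->positive), then a second pass replays only those events to assemble the phase intervals.
import Mathlib
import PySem

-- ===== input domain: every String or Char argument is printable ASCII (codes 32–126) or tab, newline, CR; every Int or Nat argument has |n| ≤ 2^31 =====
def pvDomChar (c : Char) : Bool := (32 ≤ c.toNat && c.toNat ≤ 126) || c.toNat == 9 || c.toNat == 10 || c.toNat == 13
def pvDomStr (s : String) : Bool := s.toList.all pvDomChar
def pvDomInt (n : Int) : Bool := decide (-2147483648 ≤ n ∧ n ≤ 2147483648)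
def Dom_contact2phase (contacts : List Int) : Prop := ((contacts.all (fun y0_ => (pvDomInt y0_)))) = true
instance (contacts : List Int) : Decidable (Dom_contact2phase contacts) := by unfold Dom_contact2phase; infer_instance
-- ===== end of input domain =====

-- B restructures A's single conditional loop into two passes: extract transition events, then replay them; same result, same cost (objective: alternative).

-- ===== PORT A =====
def contact2phase (contacts : List Int) : List (List (List Int)) :=
  ((PySem.List.pyRange 1 contacts.length 1).foldl
    (fun (s : List (List (List Int)) × List Int × List Int × Int) i =>
      let stepPhase := s.1; let phaseON := s.2.1; let phaseOFF := s.2.2.1; let l := s.2.2.2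
      if PySem.List.pyGetD contacts i 0 = 0 ∧ PySem.List.pyGetD contacts (i-1) 0 = 1 then
        (stepPhase, [l, i], phaseOFF, i)
      else if PySem.List.pyGetD contacts i 0 > 0 ∧ PySem.List.pyGetD contacts (i-1) 0 = 0 then
        (stepPhase ++ [[phaseON, [l, i]]], phaseON, [l, i], i)
      else s)
    ([], [], [], 0)).1

-- ===== PORT B =====
-- pass 1: the comprehension of transition events (kind, index); kind true = fall
def c2pEvents (contacts : List Int) : List (Bool × Int) :=
  (PySem.List.pyRange 1 contacts.length 1).filterMap (fun i =>
    if (PySem.List.pyGetD contacts i 0 = 0 ∧ PySem.List.pyGetD contacts (i-1) 0 = 1)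
       ∨ (PySem.List.pyGetD contacts i 0 > 0 ∧ PySem.List.pyGetD contacts (i-1) 0 = 0) then
      some (decide (PySem.List.pyGetD contacts i 0 = 0), i)
    else none)

-- pass 2: replay the events
def contact2phase_alt (contacts : List Int) : List (List (List Int)) :=
  ((c2pEvents contacts).foldl
    (fun (s : List (List (List Int)) × List Int × Int) e =>
      let stepPhase := s.1; let phaseON := s.2.1; let l := s.2.2
      if e.1 then (stepPhase, [l, e.2], e.2)
      else (stepPhase ++ [[phaseON, [l, e.2]]], phaseON, e.2))
    ([], [], 0)).1

-- ===== PRECONDITION & SPEC =====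
def Spec_contact2phase (contacts : List Int) (out : List (List (List Int))) : Prop := out = contact2phase_alt contacts
instance (contacts : List Int) (out : List (List (List Int))) : Decidable (Spec_contact2phase contacts out) := by unfold Spec_contact2phase; infer_instance

-- ===== CLAIM (what is proved, stated in full; the proofs are below) =====
def Claim_equal_contact2phase : Prop := ∀ (contacts : List Int), Dom_contact2phase contacts → Spec_contact2phase contacts (contact2phase contacts)

-- ===== LEMMAS AND PROOFS =====

-- Core invariant: folding A's body over any index list equals replaying the events
-- filtered from that list, for any A-state (the dead phaseOFF component is arbitrary).
theorem c2p_fold_eq (contacts : List Int) (idxs : List Int) :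
    ∀ (step : List (List (List Int))) (on off : List Int) (l : Int),
    (idxs.foldl
      (fun (s : List (List (List Int)) × List Int × List Int × Int) i =>
        let stepPhase := s.1; let phaseON := s.2.1; let phaseOFF := s.2.2.1; let ll := s.2.2.2
        if PySem.List.pyGetD contacts i 0 = 0 ∧ PySem.List.pyGetD contacts (i-1) 0 = 1 then
          (stepPhase, [ll, i], phaseOFF, i)
        else if PySem.List.pyGetD contacts i 0 > 0 ∧ PySem.List.pyGetD contacts (i-1) 0 = 0 then
          (stepPhase ++ [[phaseON, [ll, i]]], phaseON, [ll, i], i)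
        else s)
      (step, on, off, l)).1
    =
    ((idxs.filterMap (fun i =>
        if (PySem.List.pyGetD contacts i 0 = 0 ∧ PySem.List.pyGetD contacts (i-1) 0 = 1)
           ∨ (PySem.List.pyGetD contacts i 0 > 0 ∧ PySem.List.pyGetD contacts (i-1) 0 = 0) then
          some (decide (PySem.List.pyGetD contacts i 0 = 0), i)
        else none)).foldl
      (fun (s : List (List (List Int)) × List Int × Int) e =>
        let stepPhase := s.1; let phaseON := s.2.1; let ll := s.2.2
        if e.1 then (stepPhase, [ll, e.2], e.2)
        else (stepPhase ++ [[phaseON, [ll, e.2]]], phaseON, e.2))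
      (step, on, l)).1 := by
  induction idxs with
  | nil => intro step on off l; rfl
  | cons i rest ih =>
    intro step on off l
    by_cases h1 : PySem.List.pyGetD contacts i 0 = 0 ∧ PySem.List.pyGetD contacts (i-1) 0 = 1
    · simp only [List.foldl_cons, List.filterMap_cons, h1, and_true, if_pos, decide_true]
      exact ih step [l, i] off i
    · by_cases h2 : PySem.List.pyGetD contacts i 0 > 0 ∧ PySem.List.pyGetD contacts (i-1) 0 = 0
      · have hne : ¬ PySem.List.pyGetD contacts i 0 = 0 := by
          intro hc; exact absurd hc (by omega)
        simp only [List.foldl_cons, List.filterMap_cons, if_pos h2,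
          if_pos (Or.inr h2), hne, decide_false, Bool.false_eq_true, if_false]
        exact ih (step ++ [[on, [l, i]]]) on [l, i] i
      · have hnor : ¬ ((PySem.List.pyGetD contacts i 0 = 0 ∧ PySem.List.pyGetD contacts (i-1) 0 = 1)
           ∨ (PySem.List.pyGetD contacts i 0 > 0 ∧ PySem.List.pyGetD contacts (i-1) 0 = 0)) := by
          intro h; cases h with
          | inl h => exact h1 h
          | inr h => exact h2 h
        simp only [List.foldl_cons, List.filterMap_cons, if_neg h1, if_neg h2, if_neg hnor]
        exact ih step on off l

-- ===== VERDICT (by name: the statement is the Claim_ definition above) =====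
theorem contact2phase_spec : Claim_equal_contact2phase := by
  intro contacts _
  unfold Spec_contact2phase contact2phase contact2phase_alt c2pEvents
  exact c2p_fold_eq contacts _ [] [] [] 0
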